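-- pv_equiv track=rewrite | github.com/srishtisrivastava3103/Leetcode-Problems | 1839_longest_ substring_ of_ all _vowels_ in_ order.py | longestBeautifulSubstring
-- ===== SOURCE A (Python) =====
-- def longestBeautifulSubstring(word: str) -> int:
--     ch = [word[0]]
--     fr = [1]
--     for i in range(1,len(word)):
--         if word[i]==word[i-1]:
--             fr[-1]+=1
--         else:
--             ch.append(word[i])
--             fr.append(1)
--     m = 0
--     for i in range(4,len(ch)):
--         if ch[i-4:i+1]==['a','e','i','o','u']:
--             m = max(m,sum(fr[i-4:i+1]))
--     return m
-- ===== SOURCE B (Python) =====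
-- def longestBeautifulSubstring(word: str) -> int:
--     vowels = "aeiou"
--     prev = word[0]
--     stage = 0 if prev == 'a' else -1
--     streak = 1 if stage == 0 else 0
--     best = 0
--     for c in word[1:]:
--         if stage >= 0 and c == prev:
--             streak += 1
--         elif 0 <= stage < 4 and c == vowels[stage + 1]:
--             stage += 1
--             streak += 1
--         elif c == 'a':
--             stage = 0
--             streak = 1
--         else:
--             stage = -1
--             streak = 0
--         if stage == 4:
--             best = max(best, streak)
--         prev = c
--     return best
-- ===== Notes on version B (the rewrite author's own statement) =====
-- stated objective: faster
-- what changed: Replaces A's run-length-encoding pass (two parallel arrays) followed by a sliding 5-run window scan with slicing by a single constant-memory pass that tracks the current vowel stage, streak length and running best.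
import Mathlib
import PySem

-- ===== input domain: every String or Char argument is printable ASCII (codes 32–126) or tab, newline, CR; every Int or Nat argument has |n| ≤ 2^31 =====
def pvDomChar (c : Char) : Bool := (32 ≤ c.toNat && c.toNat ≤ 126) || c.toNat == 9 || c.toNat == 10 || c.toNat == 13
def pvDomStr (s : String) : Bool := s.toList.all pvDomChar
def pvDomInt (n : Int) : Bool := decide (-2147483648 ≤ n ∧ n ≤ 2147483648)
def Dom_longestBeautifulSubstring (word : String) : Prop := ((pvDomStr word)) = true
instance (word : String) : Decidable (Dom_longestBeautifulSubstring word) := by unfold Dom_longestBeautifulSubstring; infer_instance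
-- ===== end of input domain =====

-- B replaces A's run-length arrays + 5-run window scan by one constant-memory pass (measured constant-factor speedup).
-- Both A and B raise IndexError on the empty string (word[0]); Pre_ excludes exactly that input.

-- ===== PORT A =====
-- fr[-1] += 1 on the (always nonempty) frequency list
def pvBump : List Int → List Int
  | [] => []
  | [x] => [x + 1]
  | x :: y :: xs => x :: pvBump (y :: xs)

def longestBeautifulSubstring (word : String) : Int :=
  let cs := word.toList
  match PySem.List.pyGet? cs 0 with
  | none => 0   -- IndexError on word[0]; excluded by Pre_
  | some c0 =>
    let st := (PySem.List.pyRange 1 (cs.length : Int) 1).foldl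
      (fun (st : List Char × List Int) i =>
        if PySem.List.pyGetD cs i ' ' == PySem.List.pyGetD cs (i - 1) ' ' then
          (st.1, pvBump st.2)
        else
          (st.1 ++ [PySem.List.pyGetD cs i ' '], st.2 ++ [1]))
      ([c0], [1])
    (PySem.List.pyRange 4 (st.1.length : Int) 1).foldl
      (fun m i =>
        if PySem.List.slice st.1 (some (i - 4)) (some (i + 1)) == ['a', 'e', 'i', 'o', 'u'] then
          max m (PySem.List.slice st.2 (some (i - 4)) (some (i + 1))).sum
        else m)
      0

-- ===== PORT B =====
-- loop body of Source B; state = (stage, streak, best, prev)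
def pvBStep (vowels : List Char) (st : Int × Int × Int × Char) (c : Char) : Int × Int × Int × Char :=
  let (stage, streak, best, prev) := st
  let (stage, streak) :=
    if 0 ≤ stage ∧ c = prev then (stage, streak + 1)
    else if 0 ≤ stage ∧ stage < 4 ∧ c = PySem.List.pyGetD vowels (stage + 1) ' ' then
      (stage + 1, streak + 1)
    else if c = 'a' then ((0 : Int), (1 : Int))
    else (-1, 0)
  let best := if stage = 4 then max best streak else best
  (stage, streak, best, c)

def longestBeautifulSubstring_alt (word : String) : Int :=
  let vowels := "aeiou".toList   -- the string "aeiou", indexed as its char list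
  let cs := word.toList
  match PySem.List.pyGet? cs 0 with
  | none => 0   -- IndexError on word[0]; excluded by Pre_
  | some p0 =>
    let stage : Int := if p0 = 'a' then 0 else -1
    let streak : Int := if stage = 0 then 1 else 0
    let st := (PySem.List.slice cs (some 1) none).foldl (pvBStep vowels) (stage, streak, 0, p0)
    st.2.2.1

-- ===== PRECONDITION & SPEC =====
-- Pre_ excludes only the empty string, on which A (and B) raise IndexError at word[0].
def Pre_longestBeautifulSubstring (word : String) : Prop := word.toList ≠ []
instance (word : String) : Decidable (Pre_longestBeautifulSubstring word) := by
  unfold Pre_longestBeautifulSubstring; infer_instance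

def pvWitness_longestBeautifulSubstring : String := "aeiou"

def Spec_longestBeautifulSubstring (word : String) (out : Int) : Prop := out = longestBeautifulSubstring_alt word
instance (word : String) (out : Int) : Decidable (Spec_longestBeautifulSubstring word out) := by
  unfold Spec_longestBeautifulSubstring; infer_instance

-- ===== CLAIM (what is proved, stated in full; the proofs are below) =====
def Claim_equal_longestBeautifulSubstring : Prop := ∀ (word : String), Dom_longestBeautifulSubstring word → Pre_longestBeautifulSubstring word → Spec_longestBeautifulSubstring word (longestBeautifulSubstring word)


-- ===== LEMMAS AND PROOFS =====

-- the vowel pattern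
def pvVow : List Char := ['a', 'e', 'i', 'o', 'u']

-- structural form of A's run-length loop (state = (ch, fr), carrying the previous char)
def pvRunsGo : Char → List Char → List Char × List Int → List Char × List Int
  | _, [], st => st
  | prev, c :: l, st =>
      pvRunsGo c l (if c == prev then (st.1, pvBump st.2) else (st.1 ++ [c], st.2 ++ [1]))

-- A's second loop as a function of the run arrays
def pvAm (ch : List Char) (fr : List Int) : Int :=
  (PySem.List.pyRange 4 (ch.length : Int) 1).foldl
    (fun m i =>
      if PySem.List.slice ch (some (i - 4)) (some (i + 1)) == pvVow then
        max m (PySem.List.slice fr (some (i - 4)) (some (i + 1))).sum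
      else m) 0

-- the loop invariant tying B's state to A's run arrays
def pvInv (ch : List Char) (fr : List Int) (stage streak best : Int) (prev : Char) : Prop :=
  ch ≠ [] ∧ fr.length = ch.length ∧ ch.getLast? = some prev ∧ best = pvAm ch fr ∧
    ((stage = -1 ∧ ∀ k : Nat, k ≤ 4 → ¬ (pvVow.take (k + 1) <:+ ch)) ∨
      (∃ k : Nat, k ≤ 4 ∧ stage = (k : Int) ∧ pvVow.take (k + 1) <:+ ch ∧
        streak = (fr.drop (fr.length - (k + 1))).sum))

lemma pvBump_length : ∀ xs : List Int, (pvBump xs).length = xs.length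
  | [] => rfl
  | [_] => rfl
  | x :: y :: xs => by simp [pvBump, pvBump_length (y :: xs)]

lemma pvBump_sum : ∀ xs : List Int, xs ≠ [] → (pvBump xs).sum = xs.sum + 1
  | [x], _ => by simp [pvBump]
  | x :: y :: xs, _ => by
      simp [pvBump, pvBump_sum (y :: xs) (by simp)]; ring_nf

lemma pvBump_append (xs : List Int) : ∀ ys : List Int, ys ≠ [] →
    pvBump (xs ++ ys) = xs ++ pvBump ys := by
  induction xs with
  | nil => intro ys _; simp
  | cons x xs ih =>
      intro ys hys
      cases hxs : xs ++ ys with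
      | nil => simp_all
      | cons z zs =>
          simp only [List.cons_append, hxs, pvBump]
          rw [← hxs, ih ys hys]

lemma pvGetLast?_of_suffix {s l : List Char} (h : s <:+ l) (hs : s ≠ []) :
    l.getLast? = s.getLast? := by
  obtain ⟨pre, rfl⟩ := h
  exact List.getLast?_append_of_ne_nil pre hs

lemma pvTake_getLast? (k : Nat) (hk : k ≤ 4) :
    (pvVow.take (k + 1)).getLast? = some (pvVow.getD k ' ') := by
  interval_cases k <;> rfl

lemma pvVow_getD_inj (j k : Nat) (hj : j ≤ 4) (hk : k ≤ 4)
    (h : pvVow.getD j ' ' = pvVow.getD k ' ') : j = k := by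
  interval_cases j <;> interval_cases k <;> simp_all [pvVow]

lemma pvSuffix_last (ch : List Char) (k : Nat) (hk : k ≤ 4)
    (h : pvVow.take (k + 1) <:+ ch) : ch.getLast? = some (pvVow.getD k ' ') := by
  rw [pvGetLast?_of_suffix h (by interval_cases k <;> simp [pvVow])]
  exact pvTake_getLast? k hk

lemma pvVow_take_succ (k : Nat) (h1 : 1 ≤ k) (h2 : k ≤ 4) :
    pvVow.take (k + 1) = pvVow.take k ++ [pvVow.getD k ' '] := by
  interval_cases k <;> rfl

lemma pvSuffix_strip (ch : List Char) (c : Char) (k : Nat) (h1 : 1 ≤ k) (h2 : k ≤ 4)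
    (h : pvVow.take (k + 1) <:+ ch ++ [c]) :
    c = pvVow.getD k ' ' ∧ pvVow.take k <:+ ch := by
  obtain ⟨pre, hp⟩ := h
  rw [pvVow_take_succ k h1 h2, ← List.append_assoc] at hp
  obtain ⟨h3, h4⟩ := List.append_singleton_inj.mp hp
  exact ⟨h4.symm, ⟨pre, h3⟩⟩

lemma pvAm_small (ch : List Char) (fr : List Int) (h : ch.length ≤ 4) :
    pvAm ch fr = 0 := by
  unfold pvAm
  rw [PySem.List.pyRange_one_eq_nil (by exact_mod_cast h)]
  rfl

lemma pvAm_append (ch : List Char) (fr : List Int) (c : Char) (hlen : fr.length = ch.length) :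
    pvAm (ch ++ [c]) (fr ++ [1]) =
      if pvVow <:+ ch ++ [c] then max (pvAm ch fr) ((fr.drop (fr.length - 4)).sum + 1)
      else pvAm ch fr := by
  by_cases hn : ch.length < 4
  · rw [pvAm_small _ _ (by simp; omega), pvAm_small _ _ (by omega), if_neg]
    intro hs
    have := List.IsSuffix.length_le hs
    simp [pvVow] at this
    omega
  · push Not at hn
    unfold pvAm
    simp only [List.length_append, List.length_cons, List.length_nil]
    rw [show ((ch.length + (0 + 1) : Nat) : Int) = (ch.length : Int) + 1 by push_cast; ring]
    rw [PySem.List.pyRange_one_succ_right (by exact_mod_cast hn)]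
    rw [List.foldl_append]
    have hpre : (PySem.List.pyRange 4 (ch.length : Int) 1).foldl
        (fun m i => if PySem.List.slice (ch ++ [c]) (some (i - 4)) (some (i + 1)) == pvVow then
            max m (PySem.List.slice (fr ++ [1]) (some (i - 4)) (some (i + 1))).sum else m) 0
      = (PySem.List.pyRange 4 (ch.length : Int) 1).foldl
        (fun m i => if PySem.List.slice ch (some (i - 4)) (some (i + 1)) == pvVow then
            max m (PySem.List.slice fr (some (i - 4)) (some (i + 1))).sum else m) 0 := by
      apply PySem.List.foldl_congr_mem
      intro m i hi
      rw [PySem.List.mem_pyRange_one] at hi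
      have e4 : (i - 4) = ((i.toNat - 4 : Nat) : Int) := by omega
      have e5 : (i + 1) = ((i.toNat + 1 : Nat) : Int) := by omega
      have hi2 : i.toNat + 1 ≤ ch.length := by omega
      rw [e4, e5, PySem.List.slice_natCast, PySem.List.slice_natCast,
          PySem.List.slice_natCast, PySem.List.slice_natCast]
      rw [List.drop_append_of_le_length (by omega), List.drop_append_of_le_length (by omega),
          List.take_append_of_le_length (by simp; omega),
          List.take_append_of_le_length (by simp; omega)]
    rw [hpre]
    simp only [List.foldl_cons, List.foldl_nil]
    have e4 : ((ch.length : Int) - 4) = ((ch.length - 4 : Nat) : Int) := by omega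
    have e5 : ((ch.length : Int) + 1) = ((ch.length + 1 : Nat) : Int) := by omega
    rw [e4, e5, PySem.List.slice_natCast, PySem.List.slice_natCast]
    rw [show ch.length + 1 - (ch.length - 4) = 5 by omega]
    rw [List.take_of_length_le (by simp; omega :
          ((ch ++ [c]).drop (ch.length - 4)).length ≤ 5)]
    have hdF : ((fr ++ [1]).drop (ch.length - 4)).take 5 = fr.drop (ch.length - 4) ++ [1] := by
      rw [List.drop_append_of_le_length (by omega)]
      exact List.take_of_length_le (by simp; omega)
    rw [hdF]
    by_cases hs : pvVow <:+ ch ++ [c]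
    · have hdrop : (ch ++ [c]).drop (ch.length - 4) = pvVow := by
        rw [show ch.length - 4 = (ch ++ [c]).length - pvVow.length by simp [pvVow]]
        exact (List.suffix_iff_eq_drop.mp hs).symm
      rw [if_pos hs]
      simp only [hdrop, beq_self_eq_true, if_true, List.sum_append, List.sum_cons,
        List.sum_nil, hlen]
      norm_num
    · have hdrop : (ch ++ [c]).drop (ch.length - 4) ≠ pvVow := by
        intro hE
        exact hs (hE ▸ List.drop_suffix (ch.length - 4) (ch ++ [c]))
      rw [if_neg hs]
      simp [beq_eq_false_iff_ne.mpr hdrop]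

lemma pvAm_bump (ch : List Char) (fr : List Int) (hfr : fr ≠ []) (hlen : fr.length = ch.length) :
    pvAm ch (pvBump fr) =
      if pvVow <:+ ch then max (pvAm ch fr) ((fr.drop (fr.length - 5)).sum + 1)
      else pvAm ch fr := by
  obtain ⟨dl, lt, rfl⟩ : ∃ dl lt, fr = dl ++ [lt] :=
    ⟨fr.dropLast, fr.getLast hfr, (List.dropLast_concat_getLast hfr).symm⟩
  have hbump : pvBump (dl ++ [lt]) = dl ++ [lt + 1] := by
    rw [pvBump_append dl [lt] (by simp)]; rfl
  have hdl : dl.length + 1 = ch.length := by simpa using hlen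
  by_cases hn : ch.length < 5
  · rw [hbump, pvAm_small _ _ (by omega), pvAm_small _ _ (by omega), if_neg]
    intro hs
    have := List.IsSuffix.length_le hs
    simp [pvVow] at this
    omega
  · push Not at hn
    rw [hbump]
    have hsplit : PySem.List.pyRange 4 (ch.length : Int) 1
        = PySem.List.pyRange 4 ((ch.length - 1 : Nat) : Int) 1 ++ [((ch.length - 1 : Nat) : Int)] := by
      rw [← PySem.List.pyRange_one_succ_right (by omega)]
      congr 1
      omega
    unfold pvAm
    rw [hsplit]
    simp only [List.foldl_append, List.foldl_cons, List.foldl_nil]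
    have hpre : ∀ x : Int, (PySem.List.pyRange 4 ((ch.length - 1 : Nat) : Int) 1).foldl
        (fun m i => if PySem.List.slice ch (some (i - 4)) (some (i + 1)) == pvVow then
            max m (PySem.List.slice (dl ++ [x]) (some (i - 4)) (some (i + 1))).sum else m) 0
      = (PySem.List.pyRange 4 ((ch.length - 1 : Nat) : Int) 1).foldl
        (fun m i => if PySem.List.slice ch (some (i - 4)) (some (i + 1)) == pvVow then
            max m (PySem.List.slice dl (some (i - 4)) (some (i + 1))).sum else m) 0 := by
      intro x
      apply PySem.List.foldl_congr_mem
      intro m i hi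
      rw [PySem.List.mem_pyRange_one] at hi
      have e4 : (i - 4) = ((i.toNat - 4 : Nat) : Int) := by omega
      have e5 : (i + 1) = ((i.toNat + 1 : Nat) : Int) := by omega
      rw [e4, e5, PySem.List.slice_natCast, PySem.List.slice_natCast,
          PySem.List.slice_natCast,
          List.drop_append_of_le_length (by omega),
          List.take_append_of_le_length (by simp; omega)]
    rw [hpre (lt + 1), hpre lt]
    have e4 : (((ch.length - 1 : Nat) : Int) - 4) = ((ch.length - 5 : Nat) : Int) := by omega
    have e5 : (((ch.length - 1 : Nat) : Int) + 1) = ((ch.length : Nat) : Int) := by omega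
    rw [e4, e5, PySem.List.slice_natCast, PySem.List.slice_natCast, PySem.List.slice_natCast]
    rw [show ch.length - (ch.length - 5) = 5 by omega]
    rw [List.take_of_length_le (by simp; omega : (ch.drop (ch.length - 5)).length ≤ 5)]
    have hfrw : ∀ x : Int, ((dl ++ [x]).drop (ch.length - 5)).take 5
        = dl.drop (ch.length - 5) ++ [x] := by
      intro x
      rw [List.drop_append_of_le_length (by omega)]
      exact List.take_of_length_le (by simp; omega)
    rw [hfrw, hfrw]
    rw [show (dl ++ [lt]).length - 5 = ch.length - 5 by simp; omega]
    rw [List.drop_append_of_le_length (by omega : ch.length - 5 ≤ dl.length)]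
    by_cases hs : pvVow <:+ ch
    · have hdrop : ch.drop (ch.length - 5) = pvVow := by
        rw [show ch.length - 5 = ch.length - pvVow.length by simp [pvVow]]
        exact (List.suffix_iff_eq_drop.mp hs).symm
      rw [if_pos hs]
      simp only [hdrop, beq_self_eq_true, if_true, List.sum_append, List.sum_cons, List.sum_nil]
      rw [show (dl.drop (ch.length - 5)).sum + (lt + 1 + 0)
            = ((dl.drop (ch.length - 5)).sum + (lt + 0)) + 1 by ring]
      rw [max_assoc, max_eq_right (by omega :
        (dl.drop (ch.length - 5)).sum + (lt + 0) ≤ (dl.drop (ch.length - 5)).sum + (lt + 0) + 1)]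
    · have hdrop : ch.drop (ch.length - 5) ≠ pvVow := by
        intro hE
        exact hs (hE ▸ List.drop_suffix (ch.length - 5) ch)
      rw [if_neg hs]
      simp [beq_eq_false_iff_ne.mpr hdrop]

lemma pvVowS : "aeiou".toList = pvVow := by decide

lemma pvDrop_append_window (fr : List Int) (x : Int) (m : Nat) (hm : m ≤ fr.length) :
    (fr ++ [x]).drop (fr.length + 1 - (m + 1)) = fr.drop (fr.length - m) ++ [x] := by
  rw [show fr.length + 1 - (m + 1) = fr.length - m by omega,
      List.drop_append_of_le_length (by omega)]

lemma pvBump_drop_sum (fr : List Int) (m : Nat) (h1 : 1 ≤ m) (hm : m ≤ fr.length) :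
    ((pvBump fr).drop (fr.length - m)).sum = (fr.drop (fr.length - m)).sum + 1 := by
  have hlend : (fr.drop (fr.length - m)).length = m := by simp; omega
  have hne : fr.drop (fr.length - m) ≠ [] := by
    intro h0
    rw [h0] at hlend
    simp at hlend
    omega
  have h2 : pvBump fr = fr.take (fr.length - m) ++ pvBump (fr.drop (fr.length - m)) := by
    conv_lhs => rw [← List.take_append_drop (fr.length - m) fr]
    rw [pvBump_append _ _ hne]
  have h3 : (pvBump fr).drop (fr.length - m) = pvBump (fr.drop (fr.length - m)) := by
    rw [h2, List.drop_append_of_le_length (by simp), List.drop_take_self, List.nil_append]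
  rw [h3, pvBump_sum _ hne]

lemma pvNoSuffix (ch : List Char) (c : Char) (hca : c ≠ 'a')
    (hstep : ∀ j : Nat, j ≤ 3 → pvVow.take (j + 1) <:+ ch → c ≠ pvVow.getD (j + 1) ' ') :
    ∀ k : Nat, k ≤ 4 → ¬ (pvVow.take (k + 1) <:+ ch ++ [c]) := by
  intro k hk hsf
  cases k with
  | zero =>
      have h0 := pvSuffix_last _ 0 (by omega) hsf
      rw [List.getLast?_concat] at h0
      exact hca (by simpa [pvVow] using h0)
  | succ j =>
      obtain ⟨hc, hsub⟩ := pvSuffix_strip ch c (j + 1) (by omega) (by omega) hsf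
      exact hstep j (by omega) hsub hc

lemma pvStep (ch : List Char) (fr : List Int) (stage streak best : Int) (prev c : Char)
    (h : pvInv ch fr stage streak best prev) :
    ∃ stage' streak' best',
      pvBStep "aeiou".toList (stage, streak, best, prev) c = (stage', streak', best', c) ∧
      pvInv (if c == prev then ch else ch ++ [c])
        (if c == prev then pvBump fr else fr ++ [1]) stage' streak' best' c := by
  obtain ⟨hch, hlen, hlast, hbest, hstage⟩ := h
  have hfrpos : 0 < fr.length := by
    rw [hlen]
    exact List.length_pos_iff.mpr hch
  have hfrne : fr ≠ [] := by
    intro h0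
    rw [h0] at hfrpos
    simp at hfrpos
  rcases hstage with ⟨hs1, hnos⟩ | ⟨k, hk4, hsk, hsuf, hstreak⟩
  · -- stage = -1
    subst hs1
    have hb1 : ¬((0:Int) ≤ -1 ∧ c = prev) := by simp
    have hb2 : ¬((0:Int) ≤ -1 ∧ (-1:Int) < 4 ∧
        c = PySem.List.pyGetD "aeiou".toList (-1 + 1) ' ') := by simp
    have hpa : prev ≠ 'a' := by
      intro hpa
      apply hnos 0 (by omega)
      obtain ⟨l', hl'⟩ := List.getLast?_eq_some_iff.mp hlast
      exact ⟨l', by rw [show pvVow.take 1 = ['a'] from rfl, ← hpa, ← hl']⟩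
    by_cases hca : c = 'a'
    · -- reset to stage 0; c ≠ prev so A appends a run
      have hcp : c ≠ prev := fun hE => hpa (hE ▸ hca)
      refine ⟨0, 1, best, ?_, ?_⟩
      · simp [pvBStep, hca]
      · rw [if_neg (by simp [hcp]), if_neg (by simp [hcp])]
        refine ⟨by simp, by simp [hlen], by rw [List.getLast?_concat], ?_, ?_⟩
        · rw [hbest, pvAm_append ch fr c hlen, if_neg]
          intro hsf
          obtain ⟨hc4, _⟩ := pvSuffix_strip ch c 4 (by omega) (by omega) hsf
          rw [hca] at hc4
          simp [pvVow] at hc4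
        · right
          refine ⟨0, by omega, rfl, ⟨ch, by rw [show pvVow.take 1 = ['a'] from rfl, hca]⟩, ?_⟩
          simp only [List.length_append, List.length_cons, List.length_nil]
          rw [show fr.length + (0 + 1) = fr.length + 1 by omega,
              pvDrop_append_window fr 1 0 (by omega)]
          simp
    · by_cases hcp : c = prev
      · -- invalid stays invalid; A bumps the last run
        refine ⟨-1, 0, best, ?_, ?_⟩
        · simp [pvBStep, hca]
        · rw [if_pos (by simp [hcp]), if_pos (by simp [hcp])]
          refine ⟨hch, by rw [pvBump_length, hlen], by rw [hlast, hcp], ?_, ?_⟩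
          · rw [hbest, pvAm_bump ch fr hfrne hlen, if_neg]
            exact fun hsf => hnos 4 (by omega) hsf
          · exact Or.inl ⟨rfl, hnos⟩
      · -- invalid stays invalid; A appends a run
        refine ⟨-1, 0, best, ?_, ?_⟩
        · simp [pvBStep, hca]
        · rw [if_neg (by simp [hcp]), if_neg (by simp [hcp])]
          have hnos' := pvNoSuffix ch c hca (fun j hj hsub _ => hnos j (by omega) hsub)
          refine ⟨by simp, by simp [hlen], by rw [List.getLast?_concat], ?_, ?_⟩
          · rw [hbest, pvAm_append ch fr c hlen, if_neg]
            exact fun hsf => hnos' 4 (by omega) hsf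
          · exact Or.inl ⟨rfl, hnos'⟩
  · -- stage = k, 0 ≤ k ≤ 4
    subst hsk
    have hprev : prev = pvVow.getD k ' ' := by
      have := pvSuffix_last ch k hk4 hsuf
      rw [hlast] at this
      exact Option.some_inj.mp this
    have hk1le : k + 1 ≤ fr.length := by
      have := List.IsSuffix.length_le hsuf
      simp [pvVow] at this
      omega
    have hpy : PySem.List.pyGetD "aeiou".toList ((k : Int) + 1) ' ' = pvVow.getD (k + 1) ' ' := by
      rw [pvVowS, show ((k : Int) + 1) = ((k + 1 : Nat) : Int) by push_cast; ring,
          PySem.List.pyGetD_natCast]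
    have hpyL : PySem.List.pyGetD ['a','e','i','o','u'] ((k : Int) + 1) ' ' = pvVow.getD (k + 1) ' ' := by
      rw [show (['a','e','i','o','u'] : List Char) = pvVow from rfl, ← pvVowS]
      exact hpy
    by_cases hcp : c = prev
    · -- extend the current run: A bumps
      have hb1 : ((0:Int) ≤ (k : Int) ∧ c = prev) := ⟨by omega, hcp⟩
      refine ⟨(k : Int), streak + 1, if ((k : Int)) = 4 then max best (streak + 1) else best, ?_, ?_⟩
      · simp [pvBStep, hb1]
      · rw [if_pos (by simp [hcp]), if_pos (by simp [hcp])]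
        refine ⟨hch, by rw [pvBump_length, hlen], by rw [hlast, hcp], ?_, ?_⟩
        · rw [hbest, pvAm_bump ch fr hfrne hlen]
          by_cases hk : k = 4
          · subst hk
            rw [if_pos (show pvVow <:+ ch from hsuf), if_pos (by norm_num), hstreak]
          · have hnsuf : ¬ pvVow <:+ ch := by
              intro hsf
              have h4 := pvSuffix_last ch 4 (by omega) hsf
              rw [hlast, hprev] at h4
              exact hk (pvVow_getD_inj k 4 (by omega) (by omega) (Option.some_inj.mp h4))
            rw [if_neg hnsuf, if_neg (by omega)]
        · right
          refine ⟨k, hk4, rfl, hsuf, ?_⟩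
          rw [pvBump_length, pvBump_drop_sum fr (k + 1) (by omega) hk1le, hstreak]
    · -- c ≠ prev: A appends a run
      have hb1 : ¬((0:Int) ≤ (k : Int) ∧ c = prev) := fun hx => hcp hx.2
      by_cases hnext : k ≤ 3 ∧ c = pvVow.getD (k + 1) ' '
      · -- advance to stage k+1
        obtain ⟨hk3, hcv⟩ := hnext
        have hb2 : ((0:Int) ≤ (k : Int) ∧ (k : Int) < 4 ∧
            c = PySem.List.pyGetD "aeiou".toList ((k : Int) + 1) ' ') :=
          ⟨by omega, by omega, by rw [hpy, hcv]⟩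
        have hsuf' : pvVow.take (k + 1 + 1) <:+ ch ++ [c] := by
          obtain ⟨pre, hp⟩ := hsuf
          refine ⟨pre, ?_⟩
          rw [pvVow_take_succ (k + 1) (by omega) (by omega), ← List.append_assoc, hp, hcv]
        refine ⟨(k : Int) + 1, streak + 1,
          if ((k : Int) + 1) = 4 then max best (streak + 1) else best, ?_, ?_⟩
        · have hx : PySem.List.pyGetD ['a','e','i','o','u'] ((k : Int) + 1) ' ' ≠ prev := by
            rw [hpyL, ← hcv]; exact hcp
          simp [pvBStep, hb2, hx]
        · rw [if_neg (by simp [hcp]), if_neg (by simp [hcp])]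
          refine ⟨by simp, by simp [hlen], by rw [List.getLast?_concat], ?_, ?_⟩
          · rw [hbest, pvAm_append ch fr c hlen]
            by_cases hk : k = 3
            · subst hk
              rw [if_pos (show pvVow <:+ ch ++ [c] from hsuf'), if_pos (by norm_num), hstreak]
            · have hnsuf : ¬ pvVow <:+ ch ++ [c] := by
                intro hsf
                have h4 := pvSuffix_last _ 4 (by omega) hsf
                rw [List.getLast?_concat] at h4
                have h5 := Option.some_inj.mp h4
                rw [hcv] at h5
                have := pvVow_getD_inj (k + 1) 4 (by omega) (by omega) h5
                omega
              rw [if_neg hnsuf, if_neg (by omega)]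
          · right
            refine ⟨k + 1, by omega, by push_cast; ring, hsuf', ?_⟩
            simp only [List.length_append, List.length_cons, List.length_nil]
            rw [show fr.length + (0 + 1) = fr.length + 1 by omega,
                pvDrop_append_window fr 1 (k + 1) hk1le, List.sum_append, hstreak]
            simp
      · have hb2 : ¬((0:Int) ≤ (k : Int) ∧ (k : Int) < 4 ∧
            c = PySem.List.pyGetD "aeiou".toList ((k : Int) + 1) ' ') := by
          intro hx
          rcases hx with ⟨_, hklt, hcx⟩
          rw [hpy] at hcx
          exact hnext ⟨by omega, hcx⟩
        by_cases hca : c = 'a'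
        · -- restart at 'a'
          refine ⟨0, 1, best, ?_, ?_⟩
          · have hx1 : 'a' ≠ prev := hca ▸ hcp
            have hx2 : ¬(k < 4 ∧ 'a' = PySem.List.pyGetD ['a','e','i','o','u'] ((k : Int) + 1) ' ') := by
              intro hx
              rcases hx with ⟨h4, h5⟩
              rw [hpyL] at h5
              rw [← hca] at h5
              exact hnext ⟨by omega, h5⟩
            simp [pvBStep, hca, hx1, hx2]
          · rw [if_neg (by simp [hcp]), if_neg (by simp [hcp])]
            refine ⟨by simp, by simp [hlen], by rw [List.getLast?_concat], ?_, ?_⟩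
            · rw [hbest, pvAm_append ch fr c hlen, if_neg]
              intro hsf
              obtain ⟨hc4, _⟩ := pvSuffix_strip ch c 4 (by omega) (by omega) hsf
              rw [hca] at hc4
              simp [pvVow] at hc4
            · right
              refine ⟨0, by omega, rfl, ⟨ch, by rw [show pvVow.take 1 = ['a'] from rfl, hca]⟩, ?_⟩
              simp only [List.length_append, List.length_cons, List.length_nil]
              rw [show fr.length + (0 + 1) = fr.length + 1 by omega,
                  pvDrop_append_window fr 1 0 (by omega)]
              simp
        · -- streak broken
          have hstep : ∀ j : Nat, j ≤ 3 → pvVow.take (j + 1) <:+ ch → c ≠ pvVow.getD (j + 1) ' ' := by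
            intro j hj hsub hcx
            have hlj := pvSuffix_last ch j (by omega) hsub
            rw [hlast, hprev] at hlj
            have hkj := pvVow_getD_inj k j hk4 (by omega) (Option.some_inj.mp hlj)
            exact hnext ⟨by omega, by rw [hkj]; exact hcx⟩
          have hnos' := pvNoSuffix ch c hca hstep
          refine ⟨-1, 0, best, ?_, ?_⟩
          · have hx2 : ¬(k < 4 ∧ c = PySem.List.pyGetD ['a','e','i','o','u'] ((k : Int) + 1) ' ') := by
              intro hx
              rcases hx with ⟨h4, h5⟩
              rw [hpyL] at h5
              exact hnext ⟨by omega, h5⟩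
            simp [pvBStep, hcp, hx2, hca]
          · rw [if_neg (by simp [hcp]), if_neg (by simp [hcp])]
            refine ⟨by simp, by simp [hlen], by rw [List.getLast?_concat], ?_, ?_⟩
            · rw [hbest, pvAm_append ch fr c hlen, if_neg]
              exact fun hsf => hnos' 4 (by omega) hsf
            · exact Or.inl ⟨rfl, hnos'⟩

lemma pvMain : ∀ (l ch : List Char) (fr : List Int) (stage streak best : Int) (prev : Char),
    pvInv ch fr stage streak best prev →
    (l.foldl (pvBStep "aeiou".toList) (stage, streak, best, prev)).2.2.1 =
      pvAm (pvRunsGo prev l (ch, fr)).1 (pvRunsGo prev l (ch, fr)).2 := by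
  intro l
  induction l with
  | nil => intro ch fr stage streak best prev h; exact h.2.2.2.1
  | cons c l ih =>
      intro ch fr stage streak best prev h
      obtain ⟨stage', streak', best', heq, hinv⟩ := pvStep ch fr stage streak best prev c h
      simp only [List.foldl_cons, pvRunsGo, heq]
      by_cases hc : c == prev
      · simpa [hc] using ih ch (pvBump fr) stage' streak' best' c (by simpa [hc] using hinv)
      · simpa [hc] using ih (ch ++ [c]) (fr ++ [1]) stage' streak' best' c (by simpa [hc] using hinv)

lemma pvIdx (cs : List Char) : ∀ (fuel m : Nat) (st : List Char × List Int),
    m < cs.length → cs.length - (m + 1) = fuel →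
    (PySem.List.pyRange ((m : Int) + 1) (cs.length : Int) 1).foldl
      (fun (st : List Char × List Int) i =>
        if PySem.List.pyGetD cs i ' ' == PySem.List.pyGetD cs (i - 1) ' ' then
          (st.1, pvBump st.2)
        else
          (st.1 ++ [PySem.List.pyGetD cs i ' '], st.2 ++ [1])) st
    = pvRunsGo (cs.getD m ' ') (cs.drop (m + 1)) st := by
  intro fuel
  induction fuel with
  | zero =>
      intro m st hm hf
      rw [PySem.List.pyRange_one_eq_nil (by omega),
          List.drop_eq_nil_iff.mpr (by omega)]
      rfl
  | succ fuel ih =>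
      intro m st hm hf
      have hm1 : m + 1 < cs.length := by omega
      rw [PySem.List.pyRange_one_cons (by omega)]
      have e1 : ((m : Int) + 1) = ((m + 1 : Nat) : Int) := by push_cast; ring
      have e2 : ((m + 1 : Nat) : Int) - 1 = (m : Int) := by push_cast; ring
      simp only [List.foldl_cons, e1, e2, PySem.List.pyGetD_natCast]
      rw [List.getD_eq_getElem (l := cs) (d := ' ') hm1,
          List.getD_eq_getElem (l := cs) (d := ' ') (by omega : m < cs.length),
          List.drop_eq_getElem_cons hm1]
      have := ih (m + 1) (if cs[m + 1] == cs[m] then (st.1, pvBump st.2)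
        else (st.1 ++ [cs[m + 1]], st.2 ++ [1])) hm1 (by omega)
      rw [List.getD_eq_getElem (l := cs) (d := ' ') hm1] at this
      rw [pvRunsGo]
      exact this

lemma pvInit (c0 : Char) :
    pvInv [c0] [1] (if c0 = 'a' then 0 else -1) (if c0 = 'a' then 1 else 0) 0 c0 := by
  refine ⟨by simp, rfl, rfl, (pvAm_small _ _ (by simp)).symm, ?_⟩
  by_cases h : c0 = 'a'
  · right
    exact ⟨0, by omega, by simp [h], by simp [pvVow, h], by simp [h]⟩
  · left
    refine ⟨by simp [h], ?_⟩
    intro k hk hs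
    obtain ⟨t, ht⟩ := hs
    have hl := congrArg List.length ht
    simp [pvVow] at hl
    have hk0 : k = 0 := by omega
    have ht0 : t = [] := by
      cases t with
      | nil => rfl
      | cons a b => subst hk0; simp at hl
    subst hk0 ht0
    simp [pvVow] at ht
    exact h ht.symm


-- ===== VERDICT (by name: the statement is the Claim_ definition above) =====
lemma pvABridge (c0 : Char) (rest : List Char) :
    (PySem.List.pyRange 1 (((c0 :: rest) : List Char).length : Int) 1).foldl
      (fun (st : List Char × List Int) i =>
        if PySem.List.pyGetD (c0 :: rest) i ' ' == PySem.List.pyGetD (c0 :: rest) (i - 1) ' ' then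
          (st.1, pvBump st.2)
        else
          (st.1 ++ [PySem.List.pyGetD (c0 :: rest) i ' '], st.2 ++ [1])) ([c0], [1])
    = pvRunsGo c0 rest ([c0], [1]) := by
  have h := pvIdx (c0 :: rest) rest.length 0 ([c0], [1]) (by simp) (by simp)
  simpa using h

theorem longestBeautifulSubstring_spec : Claim_equal_longestBeautifulSubstring := by
  intro word hdom hpre
  unfold Spec_longestBeautifulSubstring
  unfold Pre_longestBeautifulSubstring at hpre
  cases hcs : word.toList with
  | nil => exact absurd hcs hpre
  | cons c0 rest =>
      unfold longestBeautifulSubstring longestBeautifulSubstring_alt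
      rw [hcs]
      simp only [PySem.List.pyGet?_zero_cons, PySem.List.slice_from_one, List.tail_cons]
      rw [pvABridge c0 rest]
      by_cases hc0 : c0 = 'a'
      · subst hc0
        have hm := pvMain rest ['a'] [1] 0 1 0 'a' (by simpa using pvInit 'a')
        simp only [reduceIte]
        rw [hm]
        rfl
      · have hm := pvMain rest [c0] [1] (-1) 0 0 c0 (by simpa [hc0] using pvInit c0)
        simp only [if_neg hc0, if_neg (show ¬((-1 : Int) = 0) by norm_num)]
        rw [hm]
        rfl
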